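-- pv_equiv track=rewrite | github.com/puddletag/puddletag | puddlestuff/findfunc.py | re_escape
-- ===== SOURCE A (Python) =====
-- def re_escape(rex):
--     """Escape regular expression special characters"""
--     escaped = ""
--     for ch in rex:
--         if ch in r'^$[]\+*?.(){},|':
--             escaped = escaped + '\\' + ch
--         else:
--             escaped = escaped + ch
--     return escaped
-- ===== SOURCE B (Python) =====
-- _SPECIALS = frozenset(r'^$[]\+*?.(){},|')
--
-- def re_escape(rex):
--     """Escape regular expression special characters"""
--     parts = []
--     i, n = 0, len(rex)
--     while i < n:
--         j = i
--         while j < n and rex[j] not in _SPECIALS: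
--             j += 1
--         parts.append(rex[i:j])        # copy the whole run of ordinary chars
--         if j < n:
--             parts.append('\\' + rex[j])
--             j += 1
--         i = j
--     return ''.join(parts)
-- ===== Notes on version B (the rewrite author's own statement) =====
-- stated objective: alternative
-- what changed: Replaces A's per-character branch-and-concat loop by a two-pointer run-based scan: maximal runs of ordinary characters are copied wholesale as slices and only special characters are handled individually, with the chunks joined once at the end.
import Mathlib
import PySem

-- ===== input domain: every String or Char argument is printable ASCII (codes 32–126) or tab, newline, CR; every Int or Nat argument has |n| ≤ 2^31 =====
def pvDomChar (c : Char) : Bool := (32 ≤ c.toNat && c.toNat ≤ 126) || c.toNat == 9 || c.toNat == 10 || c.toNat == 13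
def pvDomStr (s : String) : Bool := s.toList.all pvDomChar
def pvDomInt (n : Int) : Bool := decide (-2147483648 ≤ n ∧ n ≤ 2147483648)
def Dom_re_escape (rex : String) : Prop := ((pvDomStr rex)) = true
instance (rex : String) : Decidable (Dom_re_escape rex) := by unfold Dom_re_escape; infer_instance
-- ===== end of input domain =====

-- B replaces A's per-character branch-and-concat loop by a two-pointer run-based scan
-- (copy maximal runs of ordinary characters wholesale, escape specials individually,
-- join once); structurally different, same cost class here, no speed claimed.

-- ===== PORT A =====
-- the raw string r'^$[]\+*?.(){},|' of A's membership test
def specialsA : List Char := ['^', '$', '[', ']', '\\', '+', '*', '?', '.', '(', ')', '{', '}', ',', '|']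

-- A's loop: escaped = escaped + '\\' + ch / escaped + ch (strings as List Char)
def re_escape (rex : String) : String :=
  String.ofList (rex.toList.foldl
    (fun escaped ch =>
      if specialsA.contains ch then escaped ++ ['\\'] ++ [ch] else escaped ++ [ch]) [])

-- ===== PORT B =====
def specialsB : List Char := ['^', '$', '[', ']', '\\', '+', '*', '?', '.', '(', ')', '{', '}', ',', '|']

-- B's outer while loop: the inner `while j < n and rex[j] not in SPECIALS` scan plus the
-- slice rex[i:j] is the run `takeWhile`, the remainder from j is `dropWhile`; each
-- iteration appends the run, then the escaped special (if any), and continues after it.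
def escRuns (l : List Char) : List Char :=
  let run := l.takeWhile (fun c => !specialsB.contains c)
  match h : l.dropWhile (fun c => !specialsB.contains c) with
  | [] => run
  | c :: t => run ++ ['\\', c] ++ escRuns t
termination_by l.length
decreasing_by
  have : (l.dropWhile (fun c => !specialsB.contains c)).length ≤ l.length :=
    List.length_dropWhile_le _ _
  rw [h] at this; simp at this; omega

def re_escape_alt (rex : String) : String := String.ofList (escRuns rex.toList)

-- ===== PRECONDITION & SPEC =====
def Spec_re_escape (rex : String) (out : String) : Prop := out = re_escape_alt rex
instance (rex : String) (out : String) : Decidable (Spec_re_escape rex out) := by unfold Spec_re_escape; infer_instance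

-- ===== CLAIM =====
def Claim_equal_re_escape : Prop := ∀ (rex : String), Dom_re_escape rex → Spec_re_escape rex (re_escape rex)

-- ===== LEMMAS AND PROOFS =====

-- both ports equal the pointwise translation; connect them through it
def escChar (c : Char) : List Char := if specialsA.contains c then ['\\', c] else [c]

theorem foldl_eq_flatMap (l : List Char) (acc : List Char) :
    l.foldl (fun escaped ch =>
      if specialsA.contains ch then escaped ++ ['\\'] ++ [ch] else escaped ++ [ch]) acc
    = acc ++ l.flatMap escChar := by
  induction l generalizing acc with
  | nil => simp
  | cons c rest ih =>
    simp only [List.foldl_cons, List.flatMap_cons, ih, escChar]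
    split_ifs <;> simp

theorem flatMap_ord (l : List Char) (hall : ∀ x ∈ l, (!specialsB.contains x) = true) :
    l.flatMap escChar = l := by
  induction l with
  | nil => simp
  | cons c t iht =>
    have hc := hall c (by simp)
    simp only [List.flatMap_cons, escChar]
    rw [if_neg (by revert hc; simp [specialsB, specialsA])]
    simp [iht (fun x hx => hall x (List.mem_cons_of_mem _ hx))]

theorem escRuns_eq_flatMap (l : List Char) : escRuns l = l.flatMap escChar := by
  induction l using escRuns.induct with
  | case1 l h =>
    have hall := List.dropWhile_eq_nil_iff.mp h
    have hrun : l.takeWhile (fun c => !specialsB.contains c) = l :=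
      List.takeWhile_eq_self_iff.mpr (by intro x hx; exact hall x hx)
    rw [escRuns]
    split
    · rw [hrun, flatMap_ord l hall]
    · next c t heq => rw [h] at heq; exact absurd heq (by simp)
  | case2 l c t h ih =>
    rw [escRuns]
    split
    · next heq => rw [h] at heq; exact absurd heq (by simp)
    · next c' t' heq =>
      rw [h] at heq
      have h12 : c = c' ∧ t = t' := by simpa using heq
      obtain ⟨rfl, rfl⟩ := h12
      rw [ih]
      -- l = takeWhile ++ c :: t, with c special and every run char ordinary
      have hsplit : l = l.takeWhile (fun x => !specialsB.contains x) ++ c :: t := by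
        conv_lhs => rw [← List.takeWhile_append_dropWhile
          (p := fun x => !specialsB.contains x) (l := l)]
        rw [h]
      have hc : ¬ (!specialsB.contains c) = true := by
        have := List.head?_dropWhile_not (p := fun x => !specialsB.contains x) (l := l)
        rw [h] at this; simpa using this
      conv_rhs => rw [hsplit]
      rw [List.flatMap_append, List.flatMap_cons]
      rw [flatMap_ord _ (fun x hx => List.mem_takeWhile_imp (p := fun y => !specialsB.contains y) hx)]
      have hcc : specialsA.contains c = true := by
        revert hc; simp [specialsB, specialsA]; tauto
      simp [escChar, specialsA] at hcc ⊢
      simp [hcc]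

-- ===== VERDICT =====
theorem re_escape_spec : Claim_equal_re_escape := by
  intro rex _
  unfold Spec_re_escape re_escape re_escape_alt
  rw [foldl_eq_flatMap, escRuns_eq_flatMap]
  simp
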